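-- pv_equiv track=rewrite | github.com/Chemokoren/Algorithms-1 | GFG/Arrays/Arrangement Rearrangement/rearrangeArrayArri.py | fixHash
-- ===== SOURCE A (Python) =====
-- def fixHash(A):
--     s =set()
--
--     # storing all the values in the Set
--     for i in range(len(A)):
--         s.add(A[i])
--
--     for i in range(len(A)):
--         # check for item if present in set
--         if i in s:
--             A[i] =i
--         else:
--             A[i] =-1
--     return A
-- ===== SOURCE B (Python) =====
-- def fixHash(A):
--     vals = sorted(A)
--     n = len(A)
--     out = []
--     j = 0
--     for i in range(n):
--         while j < n and vals[j] < i: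
--             j += 1
--         if j < n and vals[j] == i:
--             out.append(i)
--         else:
--             out.append(-1)
--     return out
-- ===== Notes on version B (the rewrite author's own statement) =====
-- stated objective: alternative
-- what changed: Replaces A's hash-set membership test by sort-then-merge: sort the values once and sweep a single pointer over the sorted list in step with the index range (a two-pointer merge), emitting i when the pointer lands on it and -1 otherwise; builds a fresh list instead of mutating A.
import Mathlib
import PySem

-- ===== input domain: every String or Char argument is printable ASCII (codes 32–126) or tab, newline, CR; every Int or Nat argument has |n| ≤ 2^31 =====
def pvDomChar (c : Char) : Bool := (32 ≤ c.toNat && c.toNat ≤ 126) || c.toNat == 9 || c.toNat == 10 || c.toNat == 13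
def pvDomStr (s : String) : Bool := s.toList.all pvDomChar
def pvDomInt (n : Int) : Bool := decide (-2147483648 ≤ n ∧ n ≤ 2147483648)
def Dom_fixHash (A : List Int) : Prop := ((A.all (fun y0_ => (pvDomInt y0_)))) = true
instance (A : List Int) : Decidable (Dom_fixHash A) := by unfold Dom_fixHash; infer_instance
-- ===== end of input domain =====

-- B replaces A's hash-set membership test by sort-then-merge: sort the values once, then sweep
-- one pointer over the sorted list in step with the index range, emitting i when the pointer
-- lands on it and -1 otherwise; B builds a fresh list while the Python A mutates its argument
-- in place — the equivalence proved here is about the return value only.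

-- ===== PORT A =====
def fixHash (A : List Int) : List Int :=
  let s := (PySem.List.pyRange 0 (PySem.List.len A) 1).foldl
    (fun s i => PySem.Set.add s (PySem.List.pyGetD A i 0)) PySem.Set.empty
  (PySem.List.pyRange 0 (PySem.List.len A) 1).foldl
    (fun acc i => PySem.List.pySetD acc i (if PySem.Set.contains s i then i else -1)) A

-- ===== PORT B =====
-- the inner 'while j < n and vals[j] < i: j += 1' loop
def pvSkip (vals : List Int) (i : Int) (j : Nat) : Nat :=
  if h : j < vals.length ∧ vals.getD j 0 < i then pvSkip vals i (j+1) else j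
termination_by vals.length - j
decreasing_by omega

-- one iteration of the 'for i in range(n)' body: skip, then append i or -1
def pvStep (vals : List Int) (st : List Int × Nat) (i : Int) : List Int × Nat :=
  let j := pvSkip vals i st.2
  if j < vals.length ∧ vals.getD j 0 = i then (st.1 ++ [i], j) else (st.1 ++ [-1], j)

def fixHash_alt (A : List Int) : List Int :=
  let vals := PySem.List.sorted A (fun x => x) false
  ((List.range A.length).foldl (fun (st : List Int × Nat) (k : Nat) => pvStep vals st (k : Int)) ([], 0)).1

-- ===== PRECONDITION & SPEC =====
def Spec_fixHash (A : List Int) (out : List Int) : Prop := out = fixHash_alt A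
instance (A : List Int) (out : List Int) : Decidable (Spec_fixHash A out) := by unfold Spec_fixHash; infer_instance

-- ===== CLAIM (what is proved, stated in full; the proofs are below) =====
def Claim_equal_fixHash : Prop := ∀ (A : List Int), Dom_fixHash A → Spec_fixHash A (fixHash A)

-- ===== LEMMAS AND PROOFS =====

-- ---- A side: the write-back loop produces a map over the index range ----

-- setting index a and then taking a+1 elements appends the new value to the a-prefix
lemma take_succ_set (xs : List Int) (a : Nat) (v : Int) (h : a < xs.length) :
    (xs.set a v).take (a+1) = xs.take a ++ [v] := by
  rw [List.take_set, List.take_add_one, List.getElem?_eq_getElem h]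
  rw [show (some xs[a]).toList = [xs[a]] from rfl]
  rw [List.set_append_right _ _ (by simp)]
  simp [Nat.min_eq_left h.le]

-- A's write-back loop: assigning f i at every index i of range(a, a+n) on a list of length
-- a+n keeps the a-prefix and replaces the rest by the map of f over the indices
lemma foldl_pySetD_range (f : Int → Int) :
    ∀ (n a : Nat) (xs : List Int), xs.length = a + n →
    (PySem.List.pyRange (a:Int) ((a:Int)+(n:Int)) 1).foldl
        (fun acc i => PySem.List.pySetD acc i (f i)) xs
      = xs.take a ++ (List.range n).map (fun (k : Nat) => f ((a:Int)+(k:Int))) := by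
  intro n
  induction n with
  | zero =>
    intro a xs hlen
    rw [PySem.List.pyRange_one_eq_nil (by simp)]
    have ht : xs.take a = xs := List.take_of_length_le (by omega)
    simp [ht]
  | succ n ih =>
    intro a xs hlen
    rw [PySem.List.pyRange_one_cons (by push_cast; omega), List.foldl_cons]
    rw [PySem.List.pySetD_natCast]
    have h1 : ((a:Int) + 1) = (((a+1 : Nat)):Int) := by push_cast; ring
    have h2 : ((a:Int) + ((n+1 : Nat):Int)) = (((a+1 : Nat)):Int) + ((n:Nat):Int) := by
      push_cast; ring
    rw [h1, h2, ih (a+1) _ (by simp; omega)]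
    rw [take_succ_set xs a (f a) (by omega)]
    have hr : (List.range (n+1)).map (fun (k : Nat) => f ((a:Int)+(k:Int)))
        = f (a:Int) :: (List.range n).map (fun (k : Nat) => f (((a+1:Nat):Int)+(k:Int))) := by
      rw [List.range_succ_eq_map, List.map_cons, List.map_map]
      simp only [Nat.cast_zero, add_zero]
      congr 1
      apply List.map_congr_left
      intro k _
      simp only [Function.comp]
      congr 1
      push_cast; ring
    rw [hr, List.append_assoc, List.singleton_append]

-- specialisation to range(len(xs)) starting from the list itself
lemma foldl_pySetD_range0 (f : Int → Int) (xs : List Int) :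
    (PySem.List.pyRange 0 (PySem.List.len xs) 1).foldl
        (fun acc i => PySem.List.pySetD acc i (f i)) xs
      = (List.range xs.length).map (fun (k : Nat) => f (k:Int)) := by
  have h := foldl_pySetD_range f xs.length 0 xs (by omega)
  simp only [Nat.cast_zero, zero_add, List.take_zero, List.nil_append, PySem.List.len_eq] at h ⊢
  exact h

-- ---- B side: the pointer sweep over the sorted list computes membership ----

-- pvSkip advances to the first slot whose value is not < i, never skipping a value ≥ i
lemma pvSkip_spec (vals : List Int) (i : Int) :
    ∀ (j : Nat), (∀ k, k < j → vals.getD k 0 < i) →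
      (pvSkip vals i j ≤ vals.length ∨ pvSkip vals i j = j) ∧
      (∀ k, k < pvSkip vals i j → vals.getD k 0 < i) ∧
      (pvSkip vals i j < vals.length → ¬ vals.getD (pvSkip vals i j) 0 < i) ∧
      j ≤ pvSkip vals i j := by
  suffices H : ∀ (f j : Nat), vals.length - j ≤ f → (∀ k, k < j → vals.getD k 0 < i) →
      (pvSkip vals i j ≤ vals.length ∨ pvSkip vals i j = j) ∧
      (∀ k, k < pvSkip vals i j → vals.getD k 0 < i) ∧
      (pvSkip vals i j < vals.length → ¬ vals.getD (pvSkip vals i j) 0 < i) ∧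
      j ≤ pvSkip vals i j by
    exact fun j hk => H (vals.length - j) j le_rfl hk
  intro f
  induction f with
  | zero =>
    intro j hle hk
    rw [pvSkip]
    have hnot : ¬ (j < vals.length ∧ vals.getD j 0 < i) := by
      intro h; omega
    rw [dif_neg hnot]
    exact ⟨Or.inr rfl, hk, fun hlt => by
      intro hv; exact hnot ⟨hlt, hv⟩, le_rfl⟩
  | succ f ih =>
    intro j hle hk
    rw [pvSkip]
    by_cases h : j < vals.length ∧ vals.getD j 0 < i
    · rw [dif_pos h]
      have hk' : ∀ k, k < j + 1 → vals.getD k 0 < i := by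
        intro k hkj
        rcases Nat.lt_succ_iff_lt_or_eq.mp hkj with h1 | h1
        · exact hk k h1
        · subst h1; exact h.2
      obtain ⟨o1, o2, o3, o4⟩ := ih (j+1) (by omega) hk'
      refine ⟨?_, o2, o3, by omega⟩
      rcases o1 with h1 | h1
      · exact Or.inl h1
      · rw [h1]; exact Or.inl h.1
    · rw [dif_neg h]
      exact ⟨Or.inr rfl, hk, fun hlt hv => h ⟨hlt, hv⟩, le_rfl⟩

-- after the skip, the append condition is exactly membership of i in the sorted list
lemma cond_iff_mem (vals : List Int) (hs : vals.Pairwise (· ≤ ·)) (i : Int) (j : Nat)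
    (hlt : ∀ k, k < j → vals.getD k 0 < i)
    (hge : j < vals.length → ¬ vals.getD j 0 < i) :
    (j < vals.length ∧ vals.getD j 0 = i) ↔ i ∈ vals := by
  constructor
  · rintro ⟨hj, hv⟩
    rw [List.getD_eq_getElem vals 0 hj] at hv
    exact hv ▸ List.getElem_mem hj
  · intro hm
    obtain ⟨m, hmlen, hmv⟩ := List.mem_iff_getElem.mp hm
    have hjm : j ≤ m := by
      by_contra hc
      have := hlt m (by omega)
      rw [List.getD_eq_getElem vals 0 hmlen, hmv] at this
      omega
    have hjlen : j < vals.length := by omega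
    refine ⟨hjlen, ?_⟩
    have h1 : ¬ vals.getD j 0 < i := hge hjlen
    rw [List.getD_eq_getElem vals 0 hjlen] at h1 ⊢
    rcases Nat.lt_or_ge j m with h2 | h2
    · have := (List.pairwise_iff_getElem.mp hs) j m hjlen hmlen h2
      rw [hmv] at this
      omega
    · have : j = m := by omega
      subst this; exact hmv

-- the whole for-loop: starting with a valid pointer, it appends the membership map
lemma foldl_pvStep (vals : List Int) (hs : vals.Pairwise (· ≤ ·)) :
    ∀ (m a j : Nat) (out : List Int),
      (∀ k, k < j → vals.getD k 0 < (a:Int)) →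
      ((List.range' a m).foldl (fun (st : List Int × Nat) (k : Nat) => pvStep vals st (k : Int)) (out, j)).1
        = out ++ (List.range' a m).map (fun (k : Nat) => if (k : Int) ∈ vals then (k : Int) else -1) := by
  intro m
  induction m with
  | zero => intro a j out _; simp
  | succ m ih =>
    intro a j out hinv
    rw [List.range'_succ, List.foldl_cons, List.map_cons]
    set j' := pvSkip vals (a:Int) j with hj'
    obtain ⟨_, s2, s3, _⟩ := pvSkip_spec vals (a:Int) j hinv
    have hcond := cond_iff_mem vals hs (a:Int) j' s2 s3
    have hinv' : ∀ k, k < j' → vals.getD k 0 < ((a+1 : Nat):Int) := by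
      intro k hk
      have := s2 k hk
      push_cast
      omega
    by_cases hc : j' < vals.length ∧ vals.getD j' 0 = (a:Int)
    · have hmem : (a:Int) ∈ vals := hcond.mp hc
      rw [show pvStep vals (out, j) (a:Int) = (out ++ [(a:Int)], j') by
        simp only [pvStep, ← hj', if_pos hc]]
      rw [ih (a+1) j' (out ++ [(a:Int)]) hinv']
      simp [hmem]
    · have hmem : ¬ (a:Int) ∈ vals := fun h => hc (hcond.mpr h)
      rw [show pvStep vals (out, j) (a:Int) = (out ++ [(-1 : Int)], j') by
        simp only [pvStep, ← hj', if_neg hc]]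
      rw [ih (a+1) j' (out ++ [(-1 : Int)]) hinv']
      simp [hmem]

-- ===== VERDICT (by name: the statement is the Claim_ definition above) =====
theorem fixHash_spec : Claim_equal_fixHash := by
  intro A _
  unfold Spec_fixHash
  simp only [fixHash, fixHash_alt]
  rw [PySem.List.foldl_pyRange_zero_pyGetD A 0 (fun s v => PySem.Set.add s v) PySem.Set.empty]
  rw [foldl_pySetD_range0]
  have hs : (PySem.List.sorted A (fun x => x) false).Pairwise (· ≤ ·) := by
    have := PySem.List.sorted_pairwise A (fun x => x)
    simpa using this
  rw [List.range_eq_range' (n := A.length)]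
  rw [foldl_pvStep (PySem.List.sorted A (fun x => x) false) hs A.length 0 0 []
    (by intro k hk; omega)]
  rw [List.nil_append]
  apply List.map_congr_left
  intro k hk
  have hmemeq : ((k:Int) ∈ PySem.List.sorted A (fun x => x) false) ↔ (k:Int) ∈ A :=
    PySem.List.mem_sorted A (fun x => x) false (k:Int)
  have hset : PySem.Set.contains (A.foldl PySem.Set.add PySem.Set.empty) (k:Int)
      = decide ((k:Int) ∈ A) := by
    have he : A.foldl PySem.Set.add PySem.Set.empty = PySem.Set.ofList A := rfl
    rw [he]
    by_cases hm : (k:Int) ∈ A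
    · simp [PySem.Set.mem_ofList, hm]
    · simp [PySem.Set.mem_ofList, hm]
  rw [hset]
  by_cases hm : (k:Int) ∈ A
  · simp [hm, hmemeq]
  · simp [hm, hmemeq]
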